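-- pv_equiv track=rewrite | github.com/maxwelljoslyn/fatalfrequencies | ff/__init__.py | scene_depth
-- ===== SOURCE A (Python) =====
-- def scene_depth(tag, scenes):
--     if tag == "sadies_sob_story":
--         return 1
--     else:
--         leadins = scenes[tag].get("lead_ins", [])
--         if "sadies_sob_story" in leadins:
--             return 2
--         else:
--             pred = leadins[0]
--             return 1 + scene_depth(pred, scenes)
-- ===== SOURCE B (Python) =====
-- def next_scene(tag, scenes):
--     """The scene to walk to from `tag`, or None when the chain ends here
--     (i.e. the sob story is among this scene's lead-ins)."""
--     leadins = scenes[tag].get("lead_ins", [])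
--     if "sadies_sob_story" in leadins:
--         return None
--     return leadins[0]
--
-- def scene_depth(tag, scenes):
--     path = []
--     while tag != "sadies_sob_story":
--         path.append(tag)
--         tag = next_scene(tag, scenes)
--         if tag is None:
--             break
--     return len(path) + 1
-- ===== Notes on version B (the rewrite author's own statement) =====
-- stated objective: simpler
-- what changed: the recursion is replaced by an iterative walk driven by a next_scene step function, recording visited tags in an explicit path list so A's two sentinel returns (1 and 2) collapse into the single expression len(path) + 1
import Mathlib
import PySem

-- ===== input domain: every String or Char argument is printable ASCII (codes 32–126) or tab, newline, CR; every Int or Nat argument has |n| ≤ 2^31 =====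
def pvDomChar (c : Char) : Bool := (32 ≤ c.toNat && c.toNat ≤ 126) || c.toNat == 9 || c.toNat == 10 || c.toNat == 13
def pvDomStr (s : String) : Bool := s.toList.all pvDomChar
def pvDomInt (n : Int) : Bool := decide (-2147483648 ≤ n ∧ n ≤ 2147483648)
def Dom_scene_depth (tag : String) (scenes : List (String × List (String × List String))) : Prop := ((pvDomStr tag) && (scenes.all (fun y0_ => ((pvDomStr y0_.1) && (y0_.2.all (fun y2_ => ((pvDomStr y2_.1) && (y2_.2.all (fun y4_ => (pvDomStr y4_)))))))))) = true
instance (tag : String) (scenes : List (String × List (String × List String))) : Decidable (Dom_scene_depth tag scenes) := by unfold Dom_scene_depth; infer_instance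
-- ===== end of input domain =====

-- B replaces the recursion by an iterative walk driven by a next_scene step function,
-- recording the visited tags in an explicit path list and returning len(path) + 1.

-- ===== PORT A =====
-- A's recursion, made total with fuel (the fuel guard only makes the same computation
-- total; Pre_ guarantees the fuel is never exhausted and no lookup fails).
def sceneDepthRecA : Nat → String → List (String × List (String × List String)) → Int
  | 0, _, _ => 0
  | fuel+1, tag, scenes =>
    if tag = "sadies_sob_story" then 1
    else
      match scenes.lookup tag with      -- scenes[tag]; none = KeyError, excluded by Pre_
      | none => 0
      | some d =>
        let leadins := (d.lookup "lead_ins").getD []   -- .get("lead_ins", [])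
        if "sadies_sob_story" ∈ leadins then 2
        else
          match leadins with
          | [] => 0                      -- leadins[0] IndexError, excluded by Pre_
          | pred :: _ => 1 + sceneDepthRecA fuel pred scenes

def scene_depth (tag : String) (scenes : List (String × List (String × List String))) : Int :=
  sceneDepthRecA (scenes.length + 1) tag scenes

-- ===== PORT B =====
-- B's step function: the scene the walk moves to from tag, or none when the chain
-- ends here ("sadies_sob_story" among the lead-ins).  In Python next_scene raises
-- KeyError / IndexError where the port yields none; Pre_ excludes those inputs.
def nextScene (tag : String) (scenes : List (String × List (String × List String))) : Option String :=
  match scenes.lookup tag with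
  | none => none                        -- KeyError, excluded by Pre_
  | some d =>
    let leadins := (d.lookup "lead_ins").getD []
    if "sadies_sob_story" ∈ leadins then none
    else leadins.head?                  -- none also = IndexError on [], excluded by Pre_

-- B's while-loop as the list of visited tags (the Python `path`), made total with fuel.
def scenePathB : Nat → String → List (String × List (String × List String)) → List String
  | 0, _, _ => []
  | fuel+1, tag, scenes =>
    if tag = "sadies_sob_story" then []
    else
      match nextScene tag scenes with
      | none => [tag]                   -- break (or the excluded error points)
      | some t => tag :: scenePathB fuel t scenes

def scene_depth_alt (tag : String) (scenes : List (String × List (String × List String))) : Int :=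
  ((scenePathB (scenes.length + 1) tag scenes).length : Int) + 1

-- ===== PRECONDITION & SPEC =====
-- The lead-in chain from tag (following leadins[0]) reaches "sadies_sob_story" within
-- |scenes| + 1 steps, every visited tag is a key of scenes, and no lead_ins list on the
-- way is empty — exactly the inputs on which Python A returns (elsewhere it raises
-- KeyError/IndexError or recurses forever on a cycle; a terminating chain follows the
-- deterministic first lead-in through distinct keys, so |scenes| + 1 steps always suffice).
def chainOk : Nat → String → List (String × List (String × List String)) → Bool
  | 0, _, _ => false
  | fuel+1, tag, scenes =>
    if tag = "sadies_sob_story" then true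
    else
      match scenes.lookup tag with
      | none => false
      | some d =>
        let leadins := (d.lookup "lead_ins").getD []
        if "sadies_sob_story" ∈ leadins then true
        else
          match leadins with
          | [] => false
          | pred :: _ => chainOk fuel pred scenes

def Pre_scene_depth (tag : String) (scenes : List (String × List (String × List String))) : Prop :=
  chainOk (scenes.length + 1) tag scenes = true
instance (tag : String) (scenes : List (String × List (String × List String))) : Decidable (Pre_scene_depth tag scenes) := by unfold Pre_scene_depth; infer_instance

def pvWitness_scene_depth : String × (List (String × List (String × List String))) :=
  ("intro", [("intro", [("lead_ins", ["sadies_sob_story"])])])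

def Spec_scene_depth (tag : String) (scenes : List (String × List (String × List String))) (out : Int) : Prop := out = scene_depth_alt tag scenes
instance (tag : String) (scenes : List (String × List (String × List String))) (out : Int) : Decidable (Spec_scene_depth tag scenes out) := by unfold Spec_scene_depth; infer_instance

-- ===== CLAIM (what is proved, stated in full; the proofs are below) =====
def Claim_equal_scene_depth : Prop := ∀ (tag : String) (scenes : List (String × List (String × List String))), Dom_scene_depth tag scenes → Pre_scene_depth tag scenes → Spec_scene_depth tag scenes (scene_depth tag scenes)

-- ===== LEMMAS AND PROOFS =====
-- On any input whose chain is accepted by chainOk, A's recursion returns the length of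
-- B's visited path plus one.
theorem recA_eq_path (fuel : Nat) :
    ∀ (tag : String) (scenes : List (String × List (String × List String))),
      chainOk fuel tag scenes = true →
      sceneDepthRecA fuel tag scenes = ((scenePathB fuel tag scenes).length : Int) + 1 := by
  induction fuel with
  | zero => intro tag scenes h; simp [chainOk] at h
  | succ n ih =>
    intro tag scenes h
    simp only [chainOk] at h
    simp only [sceneDepthRecA, scenePathB]
    split_ifs at h ⊢ with h1
    · simp
    · cases hlk : scenes.lookup tag with
      | none => rw [hlk] at h; simp at h
      | some d =>
        rw [hlk] at h
        simp only [] at h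
        by_cases h2 : "sadies_sob_story" ∈ (List.lookup "lead_ins" d).getD []
        · have hn : nextScene tag scenes = none := by
            unfold nextScene; rw [hlk]; simp [h2]
          rw [hn]
          simp [h2]
        · simp only [if_neg h2] at h
          cases hl : ((List.lookup "lead_ins" d).getD []) with
          | nil => rw [hl] at h; simp at h
          | cons pred rest =>
            rw [hl] at h
            have hn : nextScene tag scenes = some pred := by
              unfold nextScene
              rw [hlk]
              simp only []
              rw [if_neg h2, hl]
              rfl
            rw [hl] at h2
            rw [hn]
            simp only [hl, List.length_cons, if_neg h2]
            rw [ih pred scenes h]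
            push_cast
            ring

-- ===== VERDICT (by name: the statement is the Claim_ definition above) =====
theorem scene_depth_spec : Claim_equal_scene_depth := by
  intro tag scenes _ hpre
  unfold Spec_scene_depth scene_depth scene_depth_alt
  exact recA_eq_path _ tag scenes hpre
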